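-- pv_equiv track=rewrite | github.com/aaronbae/leetcode | robinhood/maxrevenuefromstocks.py | maxRevenueFromStocks
-- ===== SOURCE A (Python) =====
-- def maxRevenueFromStocks(prices, algo, k):
--   N = len(prices)
--   current_sum = 0
--   for i in range(N):
--     p = prices[i]
--     if algo[i] == 1 or i < k:
--       current_sum += p
--     else:
--       current_sum -= p
--
--   max_sum = current_sum
--   for i in range(k, N):
--     incoming = prices[i]
--     outgoing = prices[i-k]
--     if algo[i] == 0:
--       current_sum += 2 * incoming
--     if algo[i-k] == 0:
--       current_sum -= 2 * outgoing
--     if current_sum > max_sum: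
--       max_sum = current_sum
--
--   return max_sum
-- ===== SOURCE B (Python) =====
-- def maxRevenueFromStocks(prices, algo, k):
--   N = len(prices)
--   base = sum(prices[:k]) + sum(p if a == 1 else -p for p, a in zip(prices[k:], algo[k:]))
--   if k >= N:
--     return base
--   corr = [2 * p if a == 0 else 0 for p, a in zip(prices, algo)]
--   pref = [0]
--   s = 0
--   for c in corr:
--     s += c
--     pref.append(s)
--   best = max(pref[j + k] - pref[j] for j in range(N - k + 1))
--   return base + best - (pref[k] - pref[0])
-- ===== Notes on version B (the rewrite author's own statement) =====
-- stated objective: alternative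
-- what changed: B computes the initial window-0 revenue as a closed slice sum, then gets the answer as base + max over window starts j of (win(j) - win(0)) where the window sums of the 0-flag correction array are read off a prefix-sum table, instead of A's incremental add/subtract slide of one running sum.
import Mathlib
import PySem

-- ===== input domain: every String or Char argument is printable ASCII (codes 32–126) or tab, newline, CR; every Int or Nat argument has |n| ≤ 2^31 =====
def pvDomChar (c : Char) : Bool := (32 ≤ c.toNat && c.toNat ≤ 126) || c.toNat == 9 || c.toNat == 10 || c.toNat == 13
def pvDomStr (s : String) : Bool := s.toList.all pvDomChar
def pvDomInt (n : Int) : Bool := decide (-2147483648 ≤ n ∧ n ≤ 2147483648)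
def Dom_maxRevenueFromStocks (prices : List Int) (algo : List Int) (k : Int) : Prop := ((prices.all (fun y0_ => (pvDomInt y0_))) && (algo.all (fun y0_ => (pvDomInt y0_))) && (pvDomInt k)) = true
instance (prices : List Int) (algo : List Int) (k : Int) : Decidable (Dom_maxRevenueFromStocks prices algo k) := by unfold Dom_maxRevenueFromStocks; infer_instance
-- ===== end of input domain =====

-- B replaces A's incrementally slid running sum by a closed base sum plus the maximum
-- length-k window sum of a derived correction array, read off a prefix-sum table (objective: alternative).

-- ===== PORT A =====
-- first loop of A: the sign-flipped sum with the first k indices forced positive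
def pvA_firstLoop (prices : List Int) (algo : List Int) (k : Int) : Int :=
  (PySem.List.pyRange 0 (prices.length : Int) 1).foldl
    (fun cs i =>
      if PySem.List.pyGetD algo i 0 = 1 ∨ i < k then cs + PySem.List.pyGetD prices i 0
      else cs - PySem.List.pyGetD prices i 0)
    0

def maxRevenueFromStocks (prices : List Int) (algo : List Int) (k : Int) : Int :=
  ((PySem.List.pyRange k (prices.length : Int) 1).foldl
    (fun (st : Int × Int) i =>
      let incoming := PySem.List.pyGetD prices i 0
      let outgoing := PySem.List.pyGetD prices (i - k) 0
      let cs1 := if PySem.List.pyGetD algo i 0 = 0 then st.1 + 2 * incoming else st.1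
      let cs2 := if PySem.List.pyGetD algo (i - k) 0 = 0 then cs1 - 2 * outgoing else cs1
      (cs2, if cs2 > st.2 then cs2 else st.2))
    (pvA_firstLoop prices algo k, pvA_firstLoop prices algo k)).2

-- ===== PORT B =====
-- B's base: first k prices bought outright, signed sum for the rest
def pvAlt_base (prices : List Int) (algo : List Int) (k : Int) : Int :=
  (PySem.List.slice prices none (some k)).sum
    + (((PySem.List.slice prices (some k) none).zip (PySem.List.slice algo (some k) none)).map
        (fun q => if q.2 = 1 then q.1 else -q.1)).sum

def pvAlt_corr (prices : List Int) (algo : List Int) : List Int :=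
  (prices.zip algo).map (fun q => if q.2 = 0 then 2 * q.1 else 0)

-- prefix-sum table of the correction array ([0] followed by the running sums)
def pvAlt_pref (prices : List Int) (algo : List Int) : List Int :=
  ((pvAlt_corr prices algo).foldl
    (fun (st : List Int × Int) c => (st.1 ++ [st.2 + c], st.2 + c)) ([0], 0)).1

def maxRevenueFromStocks_alt (prices : List Int) (algo : List Int) (k : Int) : Int :=
  if k ≥ (prices.length : Int) then pvAlt_base prices algo k
  else
    pvAlt_base prices algo k +
      (PySem.List.max?
        ((PySem.List.pyRange 0 ((prices.length : Int) - k + 1) 1).map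
          (fun j =>
            PySem.List.pyGetD (pvAlt_pref prices algo) (j + k) 0
              - PySem.List.pyGetD (pvAlt_pref prices algo) j 0))
        (fun x => x)).getD 0
      - (PySem.List.pyGetD (pvAlt_pref prices algo) k 0
          - PySem.List.pyGetD (pvAlt_pref prices algo) 0 0)

-- ===== PRECONDITION & SPEC =====
-- Pre_ excludes exactly the inputs on which A raises IndexError: a negative k, or an algo
-- list shorter than prices.
def Pre_maxRevenueFromStocks (prices : List Int) (algo : List Int) (k : Int) : Prop :=
  0 ≤ k ∧ prices.length ≤ algo.length
instance (prices : List Int) (algo : List Int) (k : Int) : Decidable (Pre_maxRevenueFromStocks prices algo k) := by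
  unfold Pre_maxRevenueFromStocks; infer_instance
def pvWitness_maxRevenueFromStocks : List Int × List Int × Int := ([3, -1, 4, 2], [1, 0, 0, 1], 2)
def Spec_maxRevenueFromStocks (prices : List Int) (algo : List Int) (k : Int) (out : Int) : Prop := out = maxRevenueFromStocks_alt prices algo k
instance (prices : List Int) (algo : List Int) (k : Int) (out : Int) : Decidable (Spec_maxRevenueFromStocks prices algo k out) := by unfold Spec_maxRevenueFromStocks; infer_instance

-- ===== CLAIM (what is proved, stated in full; the proofs are below) =====
def Claim_equal_maxRevenueFromStocks : Prop := ∀ (prices : List Int) (algo : List Int) (k : Int), Dom_maxRevenueFromStocks prices algo k → Pre_maxRevenueFromStocks prices algo k → Spec_maxRevenueFromStocks prices algo k (maxRevenueFromStocks prices algo k)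

-- ===== LEMMAS AND PROOFS =====

-- per-index base term and correction term
def pvB (prices algo : List Int) (i : Nat) : Int :=
  if algo.getD i 0 = 1 then prices.getD i 0 else -(prices.getD i 0)
def pvC (prices algo : List Int) (i : Nat) : Int :=
  if algo.getD i 0 = 0 then 2 * prices.getD i 0 else 0
-- window sum of corrections of length kn starting at j
def pvS (prices algo : List Int) (kn j : Nat) : Int :=
  ((List.range kn).map (fun t => pvC prices algo (j + t))).sum
-- B's base in closed form over indices
def pvBase (prices algo : List Int) (kn : Nat) : Int :=
  (prices.take kn).sum
    + ((List.range (prices.length - kn)).map (fun t => pvB prices algo (kn + t))).sum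

lemma pv_zip_map (prices algo : List Int) (h : prices.length ≤ algo.length) (f : Int × Int → Int) :
    (prices.zip algo).map f
      = (List.range prices.length).map (fun i => f (prices.getD i 0, algo.getD i 0)) := by
  apply List.ext_getElem
  · simp [Nat.min_eq_left h]
  · intro i h1 h2
    simp only [List.getElem_map, List.getElem_zip, List.getElem_range]
    have hip : i < prices.length := by simpa [Nat.min_eq_left h] using h1
    have hia : i < algo.length := lt_of_lt_of_le hip h
    rw [List.getD_eq_getElem _ _ hip, List.getD_eq_getElem _ _ hia]

lemma pv_if_max (a b : Int) : (if b > a then b else a) = max a b := by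
  split_ifs with h <;> omega

lemma pv_telescope (prices algo : List Int) (kn j : Nat) :
    pvS prices algo kn j + pvC prices algo (j + kn)
      = pvC prices algo j + pvS prices algo kn (j + 1) := by
  have h1 : ((List.range (kn + 1)).map (fun t => pvC prices algo (j + t))).sum
      = pvS prices algo kn j + pvC prices algo (j + kn) := by
    simp [List.range_succ, pvS]
  have h2 : ((List.range (kn + 1)).map (fun t => pvC prices algo (j + t))).sum
      = pvC prices algo j + pvS prices algo kn (j + 1) := by
    rw [List.range_succ_eq_map]
    simp only [List.map_cons, List.map_map, List.sum_cons, Nat.add_zero, pvS]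
    congr 2
    apply List.map_congr_left
    intro t _
    simp only [Function.comp_apply]
    congr 1
    omega
  omega

lemma pv_foldl_max_add (l : List Int) (b x : Int) :
    (l.map (fun y => b + y)).foldl max (b + x) = b + l.foldl max x := by
  induction l generalizing x with
  | nil => simp
  | cons c t ih =>
      simp only [List.map_cons, List.foldl_cons]
      rw [max_add_add_left]
      exact ih (max x c)

lemma pv_pref_build (l : List Int) :
    ∀ (acc : List Int) (s : Int),
      l.foldl (fun (st : List Int × Int) c => (st.1 ++ [st.2 + c], st.2 + c)) (acc, s)
        = (acc ++ (List.range l.length).map (fun t => s + (l.take (t + 1)).sum), s + l.sum) := by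
  induction l with
  | nil => intro acc s; simp
  | cons c t ih =>
      intro acc s
      simp only [List.foldl_cons]
      rw [ih (acc ++ [s + c]) (s + c), Prod.mk.injEq]
      constructor
      · rw [List.length_cons, List.range_succ_eq_map, List.map_cons, List.append_assoc,
          List.singleton_append]
        congr 1
        congr 1
        · simp
        · rw [List.map_map]
          apply List.map_congr_left
          intro u _
          simp only [Function.comp_apply, List.take_succ_cons, List.sum_cons]
          ring
      · simp; ring

lemma pv_drop_take (prices algo : List Int) (kn j : Nat)
    (h : j + kn ≤ prices.length) :
    ((((List.range prices.length).map (pvC prices algo)).drop j).take kn)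
      = (List.range kn).map (fun t => pvC prices algo (j + t)) := by
  apply List.ext_getElem
  · simp; omega
  · intro i h1 h2
    simp only [List.getElem_take, List.getElem_drop, List.getElem_map, List.getElem_range]

lemma pv_take_sub (prices algo : List Int) (kn j : Nat)
    (h : j + kn ≤ prices.length) :
    ((((List.range prices.length).map (pvC prices algo)).take (j + kn)).sum
      - (((List.range prices.length).map (pvC prices algo)).take j).sum)
      = pvS prices algo kn j := by
  rw [List.take_add, List.sum_append, pv_drop_take prices algo kn j h]
  simp [pvS]

-- A's sliding loop computes the running max of BB + pvS over all later windows
lemma pv_loopA (prices algo : List Int) (kn : Nat) (b : Int) :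
    ∀ (d j : Nat) (ms : Int), j + kn + d = prices.length →
      ((PySem.List.pyRange (((j + kn : Nat) : Int)) ((prices.length : Nat) : Int) 1).foldl
        (fun (st : Int × Int) i =>
          let incoming := PySem.List.pyGetD prices i 0
          let outgoing := PySem.List.pyGetD prices (i - (kn : Int)) 0
          let cs1 := if PySem.List.pyGetD algo i 0 = 0 then st.1 + 2 * incoming else st.1
          let cs2 := if PySem.List.pyGetD algo (i - (kn : Int)) 0 = 0 then cs1 - 2 * outgoing else cs1
          (cs2, if cs2 > st.2 then cs2 else st.2))
        (b + pvS prices algo kn j, ms)).2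
      = List.foldl max ms
          ((List.range d).map (fun t => b + pvS prices algo kn (j + 1 + t))) := by
  intro d
  induction d with
  | zero =>
      intro j ms h
      have hle : ((prices.length : Nat) : Int) ≤ ((j + kn : Nat) : Int) := by
        exact_mod_cast (by omega : prices.length ≤ j + kn)
      rw [PySem.List.pyRange_one_eq_nil hle]
      simp
  | succ d ih =>
      intro j ms h
      have hlt : (((j + kn : Nat) : Int)) < ((prices.length : Nat) : Int) := by
        exact_mod_cast (by omega : j + kn < prices.length)
      have harg : ((j + kn : Nat) : Int) - (kn : Int) = ((j : Nat) : Int) := by push_cast; ring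
      have hc : ((j + kn : Nat) : Int) + 1 = (((j + 1) + kn : Nat) : Int) := by push_cast; ring
      rw [PySem.List.pyRange_one_cons hlt, List.foldl_cons]
      have htel := pv_telescope prices algo kn j
      simp only [harg, PySem.List.pyGetD_natCast]
      have e2 : (if algo.getD (j + kn) 0 = 0
            then (b + pvS prices algo kn j) + 2 * prices.getD (j + kn) 0
            else b + pvS prices algo kn j)
          = b + pvS prices algo kn j + pvC prices algo (j + kn) := by
        unfold pvC; split_ifs <;> ring
      rw [e2]
      have e3 : (if algo.getD j 0 = 0
            then b + pvS prices algo kn j + pvC prices algo (j + kn)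
                  - 2 * prices.getD j 0
            else b + pvS prices algo kn j + pvC prices algo (j + kn))
          = b + pvS prices algo kn (j + 1) := by
        unfold pvC at htel ⊢; split_ifs at htel ⊢ <;> omega
      rw [e3, pv_if_max, hc, ih (j + 1) _ (by omega)]
      rw [List.range_succ_eq_map, List.map_cons, List.foldl_cons, List.map_map]
      simp only [Nat.add_zero]
      congr 1
      apply List.map_congr_left
      intro t _
      simp only [Function.comp_apply]
      congr 2
      omega

lemma pv_loopA0 (prices algo : List Int) (kn : Nat) (b : Int) (ms : Int)
    (h : kn ≤ prices.length) :
    ((PySem.List.pyRange ((kn : Nat) : Int) ((prices.length : Nat) : Int) 1).foldl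
      (fun (st : Int × Int) i =>
        let incoming := PySem.List.pyGetD prices i 0
        let outgoing := PySem.List.pyGetD prices (i - (kn : Int)) 0
        let cs1 := if PySem.List.pyGetD algo i 0 = 0 then st.1 + 2 * incoming else st.1
        let cs2 := if PySem.List.pyGetD algo (i - (kn : Int)) 0 = 0 then cs1 - 2 * outgoing else cs1
        (cs2, if cs2 > st.2 then cs2 else st.2))
      (b + pvS prices algo kn 0, ms)).2
    = List.foldl max ms
        ((List.range (prices.length - kn)).map
          (fun t => b + pvS prices algo kn (t + 1))) := by
  have h0 := pv_loopA prices algo kn b (prices.length - kn) 0 ms (by omega)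
  simp only [Nat.zero_add] at h0
  rw [h0]
  apply congrArg
  apply List.map_congr_left
  intro t _
  have he : 1 + t = t + 1 := by omega
  rw [he]

-- ===== VERDICT (by name: the statement is the Claim_ definition above) =====
theorem maxRevenueFromStocks_spec : Claim_equal_maxRevenueFromStocks := by
  intro prices algo k _ hpre
  obtain ⟨hk, hlen⟩ := hpre
  obtain ⟨kn, rfl⟩ : ∃ kn : Nat, k = (kn : Int) := ⟨k.toNat, (Int.toNat_of_nonneg hk).symm⟩
  unfold Spec_maxRevenueFromStocks maxRevenueFromStocks maxRevenueFromStocks_alt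
  have hdropD : ∀ (l : List Int) (m t : Nat), (l.drop m).getD t 0 = l.getD (m + t) 0 := by
    intro l m t
    simp [List.getD_eq_getElem?_getD, List.getElem?_drop]
  have htakeMap : ∀ (l : List Int) (m : Nat), m ≤ l.length →
      (List.range m).map (fun i => l.getD i 0) = l.take m := by
    intro l m hm
    apply List.ext_getElem
    · simp [hm]
    · intro i h1 h2
      simp only [List.getElem_map, List.getElem_range, List.getElem_take]
      rw [List.getD_eq_getElem _ _ (by simp at h1 ⊢; omega)]
  -- A's first loop equals B's base, both in closed form
  have hfirst : pvA_firstLoop prices algo (kn : Int)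
      = pvBase prices algo kn := by
    unfold pvA_firstLoop
    rw [PySem.List.pyRange_zero_nat, List.foldl_map]
    have hbody : (fun (cs : Int) (i : Nat) =>
          if PySem.List.pyGetD algo (↑i) 0 = 1 ∨ ((i : Nat) : Int) < ((kn : Nat) : Int)
          then cs + PySem.List.pyGetD prices (↑i) 0
          else cs - PySem.List.pyGetD prices (↑i) 0)
        = (fun cs i => cs +
            (if algo.getD i 0 = 1 ∨ i < kn then prices.getD i 0 else -(prices.getD i 0))) := by
      funext cs i
      rw [PySem.List.pyGetD_natCast, PySem.List.pyGetD_natCast]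
      simp only [Nat.cast_lt]
      split_ifs <;> ring
    rw [hbody, PySem.List.foldl_add, zero_add]
    have hsplit : List.range prices.length
        = List.range (min kn prices.length)
          ++ (List.range (prices.length - min kn prices.length)).map
              (fun x => min kn prices.length + x) := by
      rw [← List.range_add]; congr 1; omega
    rw [hsplit, List.map_append, List.sum_append, List.map_map]
    unfold pvBase
    congr 1
    · have h1 : (List.range (min kn prices.length)).map
            (fun i => if algo.getD i 0 = 1 ∨ i < kn then prices.getD i 0 else -(prices.getD i 0))
          = (List.range (min kn prices.length)).map (fun i => prices.getD i 0) := by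
        apply List.map_congr_left
        intro i hi
        exact if_pos (Or.inr (by have := List.mem_range.mp hi; omega))
      rw [h1, htakeMap prices _ (by omega)]
      rcases le_total kn prices.length with hc | hc
      · rw [Nat.min_eq_left hc]
      · rw [Nat.min_eq_right hc, List.take_length, List.take_of_length_le hc]
    · rcases le_total kn prices.length with hc | hc
      · rw [Nat.min_eq_left hc]
        apply congrArg List.sum
        apply List.map_congr_left
        intro t _
        simp only [Function.comp_apply]
        unfold pvB
        by_cases h1 : algo.getD (kn + t) 0 = 1
        · rw [if_pos (Or.inl h1), if_pos h1]
        · rw [if_neg (by rintro (h | h); exacts [h1 h, by omega]), if_neg h1]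
      · have hz : prices.length - min kn prices.length = 0 := by omega
        have hz2 : prices.length - kn = 0 := by omega
        rw [hz, hz2]
        simp
  have hbaseB : pvAlt_base prices algo ((kn : Nat) : Int) = pvBase prices algo kn := by
    unfold pvAlt_base pvBase
    rw [PySem.List.slice_to_natCast, PySem.List.slice_from_natCast,
      PySem.List.slice_from_natCast]
    congr 1
    rw [pv_zip_map (prices.drop kn) (algo.drop kn)
      (by simp only [List.length_drop]; omega)]
    apply congrArg List.sum
    simp only [List.length_drop]
    apply List.map_congr_left
    intro t _
    rw [hdropD, hdropD]
    unfold pvB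
    rfl
  have hcorr : pvAlt_corr prices algo = (List.range prices.length).map (pvC prices algo) := by
    unfold pvAlt_corr
    rw [pv_zip_map prices algo hlen]
    apply List.map_congr_left
    intro i _
    simp [pvC]
  by_cases hbig : prices.length ≤ kn
  · -- N <= k: the whole array is window 0; A's sliding loop is empty
    have hbigI : ((kn : Nat) : Int) ≥ ((prices.length : Nat) : Int) := by exact_mod_cast hbig
    rw [if_pos hbigI, PySem.List.pyRange_one_eq_nil (by exact_mod_cast hbig)]
    simp only [List.foldl_nil]
    rw [hfirst, hbaseB]
  · -- k < N
    have hlt : kn < prices.length := by omega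
    have hnbig : ¬ ((kn : Int) ≥ ((prices.length : Nat) : Int)) := by
      rw [not_le]; exact_mod_cast hlt
    rw [if_neg hnbig, hfirst, hbaseB]
    -- the prefix table realises the prefix sums of the correction array
    have hpref : pvAlt_pref prices algo
        = (0 : Int) :: (List.range prices.length).map
            (fun t => ((((List.range prices.length).map (pvC prices algo)).take (t + 1)).sum)) := by
      unfold pvAlt_pref
      rw [hcorr, pv_pref_build]
      simp
    have hgetD : ∀ m, m ≤ prices.length →
        (pvAlt_pref prices algo).getD m 0
          = (((List.range prices.length).map (pvC prices algo)).take m).sum := by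
      intro m hm
      rw [hpref]
      cases m with
      | zero => simp
      | succ t =>
          simp only [List.getD_cons_succ]
          rw [PySem.List.getD_map_range _ _ _ _ (by omega)]
    have hwin0 : PySem.List.pyGetD (pvAlt_pref prices algo) ((kn : Nat) : Int) 0
        - PySem.List.pyGetD (pvAlt_pref prices algo) 0 0 = pvS prices algo kn 0 := by
      rw [PySem.List.pyGetD_natCast, PySem.List.pyGetD_zero,
        hgetD kn (le_of_lt hlt), hgetD 0 (Nat.zero_le _)]
      simpa using pv_take_sub prices algo kn 0 (by omega)
    rw [hwin0]
    have hM : ((prices.length : Nat) : Int) - (kn : Int) + 1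
        = ((prices.length - kn + 1 : Nat) : Int) := by
      rw [Nat.cast_add, Nat.cast_sub (le_of_lt hlt)]
      norm_num
    rw [hM, PySem.List.pyRange_zero_nat, List.map_map]
    have hws : (List.range (prices.length - kn + 1)).map
          ((fun j => PySem.List.pyGetD (pvAlt_pref prices algo) (j + (kn : Int)) 0
              - PySem.List.pyGetD (pvAlt_pref prices algo) j 0) ∘ (fun (m : Nat) => (m : Int)))
        = (List.range (prices.length - kn + 1)).map (fun j => pvS prices algo kn j) := by
      apply List.map_congr_left
      intro j hj
      have hj' : j ≤ prices.length - kn := by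
        have := List.mem_range.mp hj; omega
      simp only [Function.comp_apply]
      have hjk : ((j : Nat) : Int) + ((kn : Nat) : Int) = ((j + kn : Nat) : Int) := by
        push_cast; ring
      rw [hjk, PySem.List.pyGetD_natCast, PySem.List.pyGetD_natCast,
        hgetD _ (by omega), hgetD _ (by omega)]
      exact pv_take_sub prices algo kn j (by omega)
    rw [hws, List.range_succ_eq_map, List.map_cons, PySem.List.max?_id_cons,
      Option.getD_some, List.map_map]
    -- write A's running sum as (base - win 0) + the current window sum
    have hinit : pvBase prices algo kn
        = (pvBase prices algo kn - pvS prices algo kn 0) + pvS prices algo kn 0 := by ring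
    rw [hinit, pv_loopA0 prices algo kn _ _ (le_of_lt hlt)]
    have hA : (fun t => (pvBase prices algo kn - pvS prices algo kn 0) + pvS prices algo kn (t + 1))
        = (fun y => (pvBase prices algo kn - pvS prices algo kn 0) + y)
            ∘ (fun t => pvS prices algo kn (t + 1)) := rfl
    rw [hA, ← List.map_map, pv_foldl_max_add]
    have hsucc : ((fun j => pvS prices algo kn j) ∘ Nat.succ)
        = (fun t => pvS prices algo kn (t + 1)) := by
      funext t
      simp [Nat.succ_eq_add_one]
    rw [hsucc]
    ring
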